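-- pv_equiv track=rewrite | github.com/Gulabbrar/ADHD-Detection | asrs_assessment.py | _encouraging_msg
-- ===== SOURCE A (Python) =====
-- def _encouraging_msg(answered: int) -> str:
--     msgs = {
--         0:  "Take your time — there are no right or wrong answers. 💙",
--         4:  "Good start! Keep going, you're doing great. 🌱",
--         8:  "One third done! You're building a clearer picture. 🌟",
--         12: "Halfway there — stay honest with yourself. 💪",
--         16: "Almost done — just a few more questions! 🎯",
--         20: "Final stretch! Your insights are nearly complete. ✨",
--         24: "All done! Scroll down to see your results. 🎉",
--     }
--     for threshold in sorted(msgs.keys(), reverse=True):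
--         if answered >= threshold:
--             return msgs[threshold]
--     return msgs[0]
-- ===== SOURCE B (Python) =====
-- MESSAGES = [
--     "Take your time — there are no right or wrong answers. 💙",
--     "Good start! Keep going, you're doing great. 🌱",
--     "One third done! You're building a clearer picture. 🌟",
--     "Halfway there — stay honest with yourself. 💪",
--     "Almost done — just a few more questions! 🎯",
--     "Final stretch! Your insights are nearly complete. ✨",
--     "All done! Scroll down to see your results. 🎉",
-- ]
--
-- def _encouraging_msg(answered: int) -> str:
--     # thresholds are exactly 0,4,...,24: index arithmetically, clamped to [0,6]
--     return MESSAGES[max(0, min(answered // 4, 6))]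
-- ===== Notes on version B (the rewrite author's own statement) =====
-- stated objective: simpler
-- what changed: Replaced the dict, sorted() call and descending threshold scan by a list of messages indexed directly with one clamped arithmetic index computed by integer division, exploiting the equal spacing of the thresholds.
import Mathlib
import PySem

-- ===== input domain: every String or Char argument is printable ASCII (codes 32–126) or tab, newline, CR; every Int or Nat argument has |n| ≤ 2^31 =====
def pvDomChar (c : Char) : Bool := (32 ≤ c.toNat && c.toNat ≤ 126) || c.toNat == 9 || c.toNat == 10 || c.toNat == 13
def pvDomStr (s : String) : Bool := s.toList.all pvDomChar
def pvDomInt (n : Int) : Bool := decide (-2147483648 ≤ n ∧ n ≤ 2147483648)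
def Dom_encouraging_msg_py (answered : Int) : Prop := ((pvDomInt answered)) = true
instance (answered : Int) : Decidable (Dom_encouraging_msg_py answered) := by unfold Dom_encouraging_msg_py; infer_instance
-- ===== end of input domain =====

-- B replaces A's dict + sorted() + descending scan by a direct clamped arithmetic index
-- into a list of messages (objective: simpler).

-- ===== PORT A =====
-- the dict literal of A, in insertion order
def pvMsgsA : PySem.Dict Int String := PySem.Dict.ofList
  [ (0,  "Take your time — there are no right or wrong answers. 💙"),
    (4,  "Good start! Keep going, you're doing great. 🌱"),
    (8,  "One third done! You're building a clearer picture. 🌟"),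
    (12, "Halfway there — stay honest with yourself. 💪"),
    (16, "Almost done — just a few more questions! 🎯"),
    (20, "Final stretch! Your insights are nearly complete. ✨"),
    (24, "All done! Scroll down to see your results. 🎉") ]

-- the 'for threshold in … : if answered >= threshold: return msgs[threshold]' loop
def pvLoopA (answered : Int) : List Int → Option String
  | [] => none
  | t :: rest => if answered ≥ t then some (pvMsgsA.getD t "") else pvLoopA answered rest

def encouraging_msg_py (answered : Int) : String :=
  match pvLoopA answered (PySem.List.sorted pvMsgsA.keys (fun x => x) true) with
  | some s => s
  | none => pvMsgsA.getD 0 ""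

-- ===== PORT B =====
def pvMessagesB : List String :=
  [ "Take your time — there are no right or wrong answers. 💙",
    "Good start! Keep going, you're doing great. 🌱",
    "One third done! You're building a clearer picture. 🌟",
    "Halfway there — stay honest with yourself. 💪",
    "Almost done — just a few more questions! 🎯",
    "Final stretch! Your insights are nearly complete. ✨",
    "All done! Scroll down to see your results. 🎉" ]

def encouraging_msg_py_alt (answered : Int) : String :=
  -- MESSAGES[max(0, min(answered // 4, 6))]; the clamped index is always in range, so getD "" never fires
  (PySem.List.pyGet? pvMessagesB (max 0 (min (PySem.Int.floordiv answered 4) 6))).getD ""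

-- ===== PRECONDITION & SPEC =====
def Spec_encouraging_msg_py (answered : Int) (out : String) : Prop := out = encouraging_msg_py_alt answered
instance (answered : Int) (out : String) : Decidable (Spec_encouraging_msg_py answered out) := by unfold Spec_encouraging_msg_py; infer_instance

-- ===== CLAIM (what is proved, stated in full; the proofs are below) =====
def Claim_equal_encouraging_msg_py : Prop := ∀ (answered : Int), Dom_encouraging_msg_py answered → Spec_encouraging_msg_py answered (encouraging_msg_py answered)

-- ===== LEMMAS AND PROOFS =====

-- the sorted, reversed key list of A's dict is the literal descending list
lemma pvKeysA_sorted : PySem.List.sorted pvMsgsA.keys (fun x => x) true = [24, 20, 16, 12, 8, 4, 0] := by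
  decide

lemma pvIdx_eq (a q : Int) (h1 : q * 4 ≤ a) (h2 : a < (q + 1) * 4) (hq0 : 0 ≤ q) (hq6 : q ≤ 6) :
    max 0 (min (PySem.Int.floordiv a 4) 6) = q := by
  have : PySem.Int.floordiv a 4 = q := by
    rw [PySem.Int.floordiv_eq_iff_of_pos (by omega)]
    omega
  omega

-- ===== VERDICT (by name: the statement is the Claim_ definition above) =====
theorem encouraging_msg_py_spec : Claim_equal_encouraging_msg_py := by
  intro a _
  unfold Spec_encouraging_msg_py encouraging_msg_py encouraging_msg_py_alt
  rw [pvKeysA_sorted]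
  by_cases h24 : 24 ≤ a
  · have hi : max 0 (min (PySem.Int.floordiv a 4) 6) = 6 := by
      have : 6 ≤ PySem.Int.floordiv a 4 := by
        rw [PySem.Int.le_floordiv_iff_mul_le (by omega)]; omega
      omega
    rw [hi]
    simp [pvLoopA, h24]; decide
  · by_cases h20 : 20 ≤ a
    · rw [pvIdx_eq a 5 (by omega) (by omega) (by omega) (by omega)]
      simp [pvLoopA, h24, h20]; decide
    · by_cases h16 : 16 ≤ a
      · rw [pvIdx_eq a 4 (by omega) (by omega) (by omega) (by omega)]
        simp [pvLoopA, h24, h20, h16]; decide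
      · by_cases h12 : 12 ≤ a
        · rw [pvIdx_eq a 3 (by omega) (by omega) (by omega) (by omega)]
          simp [pvLoopA, h24, h20, h16, h12]; decide
        · by_cases h8 : 8 ≤ a
          · rw [pvIdx_eq a 2 (by omega) (by omega) (by omega) (by omega)]
            simp [pvLoopA, h24, h20, h16, h12, h8]; decide
          · by_cases h4 : 4 ≤ a
            · rw [pvIdx_eq a 1 (by omega) (by omega) (by omega) (by omega)]
              simp [pvLoopA, h24, h20, h16, h12, h8, h4]; decide
            · by_cases h0 : 0 ≤ a
              · rw [pvIdx_eq a 0 (by omega) (by omega) (by omega) (by omega)]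
                simp [pvLoopA, h24, h20, h16, h12, h8, h4, h0]; decide
              · have hi : max 0 (min (PySem.Int.floordiv a 4) 6) = 0 := by
                  have : PySem.Int.floordiv a 4 < 0 := by
                    rw [PySem.Int.floordiv_lt_iff_lt_mul (by omega)]; omega
                  omega
                rw [hi]
                simp [pvLoopA, h24, h20, h16, h12, h8, h4, h0]; decide
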